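-- pv_equiv track=rewrite | github.com/Hyjkblj/BlazePen | backend/training/recommendation_policy.py | _count_consecutive_risk_rounds
-- ===== SOURCE A (Python) =====
-- from typing import Any, Dict, Iterable, List, Optional, Sequence
--
-- def _count_consecutive_risk_rounds(
--
--     recent_risk_rounds: Sequence[Sequence[str]],
--     risk_flag: str,
-- ) -> int:
--     """统计某个风险在最近几轮末尾连续出现了多少轮。"""
--     consecutive_rounds = 0
--     for round_flags in reversed(list(recent_risk_rounds or [])):
--         if risk_flag not in round_flags:
--             break
--         consecutive_rounds += 1
--     return consecutive_rounds
-- ===== SOURCE B (Python) =====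
-- from typing import Sequence
--
-- def _count_consecutive_risk_rounds(
--     recent_risk_rounds: Sequence[Sequence[str]],
--     risk_flag: str,
-- ) -> int:
--     rounds = list(recent_risk_rounds or [])
--     last_missing = -1
--     for i, round_flags in enumerate(rounds):
--         if risk_flag not in round_flags:
--             last_missing = i
--     return len(rounds) - last_missing - 1
-- ===== Notes on version B (the rewrite author's own statement) =====
-- stated objective: alternative
-- what changed: Replaces the reversed loop with early break by a single forward pass that records the index of the last round missing the flag and returns len - last_missing - 1.
import Mathlib
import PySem

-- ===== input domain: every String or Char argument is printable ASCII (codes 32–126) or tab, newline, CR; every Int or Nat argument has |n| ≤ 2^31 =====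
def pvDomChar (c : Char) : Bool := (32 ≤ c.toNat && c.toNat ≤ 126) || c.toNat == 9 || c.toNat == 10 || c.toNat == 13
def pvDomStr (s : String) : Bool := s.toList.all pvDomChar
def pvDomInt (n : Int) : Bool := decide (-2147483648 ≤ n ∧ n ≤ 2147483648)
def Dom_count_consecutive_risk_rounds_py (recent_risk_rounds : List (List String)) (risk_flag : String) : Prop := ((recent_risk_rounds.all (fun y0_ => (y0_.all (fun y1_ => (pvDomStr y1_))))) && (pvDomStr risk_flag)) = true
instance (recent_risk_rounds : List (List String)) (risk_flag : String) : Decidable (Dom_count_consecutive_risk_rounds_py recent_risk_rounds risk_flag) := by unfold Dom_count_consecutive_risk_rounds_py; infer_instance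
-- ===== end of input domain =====

-- B replaces A's reversed-with-break loop by a forward enumerate pass recording the
-- last index whose round misses the flag, returning len - last_missing - 1 (alternative decomposition).

-- ===== PORT A =====
-- the 'for … reversed … break' loop of A, with its accumulator
def pvALoop (risk_flag : String) (acc : Int) : List (List String) → Int
  | [] => acc
  | round_flags :: rest =>
      if ¬ (risk_flag ∈ round_flags) then acc
      else pvALoop risk_flag (acc + 1) rest

def count_consecutive_risk_rounds_py (recent_risk_rounds : List (List String)) (risk_flag : String) : Int :=
  pvALoop risk_flag 0 recent_risk_rounds.reverse

-- ===== PORT B =====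
def count_consecutive_risk_rounds_py_alt (recent_risk_rounds : List (List String)) (risk_flag : String) : Int :=
  let rounds := recent_risk_rounds
  let last_missing :=
    (PySem.List.enumerate rounds 0).foldl
      (fun acc p => if ¬ (risk_flag ∈ p.2) then p.1 else acc) (-1)
  (rounds.length : Int) - last_missing - 1

-- ===== PRECONDITION & SPEC =====
def Spec_count_consecutive_risk_rounds_py (recent_risk_rounds : List (List String)) (risk_flag : String) (out : Int) : Prop := out = count_consecutive_risk_rounds_py_alt recent_risk_rounds risk_flag
instance (recent_risk_rounds : List (List String)) (risk_flag : String) (out : Int) : Decidable (Spec_count_consecutive_risk_rounds_py recent_risk_rounds risk_flag out) := by unfold Spec_count_consecutive_risk_rounds_py; infer_instance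

-- ===== CLAIM =====
def Claim_equal_count_consecutive_risk_rounds_py : Prop := ∀ (recent_risk_rounds : List (List String)) (risk_flag : String), Dom_count_consecutive_risk_rounds_py recent_risk_rounds risk_flag → Spec_count_consecutive_risk_rounds_py recent_risk_rounds risk_flag (count_consecutive_risk_rounds_py recent_risk_rounds risk_flag)

-- ===== LEMMAS AND PROOFS =====
theorem pvALoop_acc (risk_flag : String) (acc : Int) (l : List (List String)) :
    pvALoop risk_flag acc l = acc + pvALoop risk_flag 0 l := by
  induction l generalizing acc with
  | nil => simp [pvALoop]
  | cons r t ih =>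
    by_cases h : risk_flag ∈ r
    · simp [pvALoop, h, ih (acc + 1), ih 1]; ring
    · simp [pvALoop, h]

theorem pv_main (risk_flag : String) (rs : List (List String)) :
    count_consecutive_risk_rounds_py rs risk_flag
      = count_consecutive_risk_rounds_py_alt rs risk_flag := by
  induction rs using List.reverseRecOn with
  | nil => rfl
  | append_singleton ys r ih =>
    unfold count_consecutive_risk_rounds_py count_consecutive_risk_rounds_py_alt at *
    simp only [List.reverse_append, List.reverse_cons, List.reverse_nil, List.nil_append,
      List.cons_append, PySem.List.enumerate_append, List.foldl_append, List.length_append,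
      PySem.List.enumerate_cons, PySem.List.enumerate_nil, List.foldl_cons, List.foldl_nil] at *
    by_cases h : risk_flag ∈ r
    · simp only [pvALoop, h, not_true_eq_false, if_false, if_neg (not_not_intro h)]
      rw [pvALoop_acc, ih]
      simp only [List.length_cons, List.length_nil]
      push_cast
      ring
    · simp only [pvALoop, h, not_false_eq_true, if_true, if_pos h]
      simp only [List.length_cons, List.length_nil]
      push_cast
      ring

-- ===== VERDICT =====
theorem count_consecutive_risk_rounds_py_spec : Claim_equal_count_consecutive_risk_rounds_py := by
  intro rs flag _
  exact pv_main flag rs
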